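-- pv_equiv track=rewrite | github.com/baoilleach/ANNalog | get_prefixed.py | _run_len_from_zero
-- ===== SOURCE A (Python) =====
-- from typing import Iterable, List, Sequence, Set, Tuple, Dict, Any, Optional
--
-- def _run_len_from_zero(idxs: Iterable[int]) -> int:
--     s = set(idxs)
--     if 0 not in s:
--         return 0
--     k = 0
--     while k in s:
--         k += 1
--     return k  # count of atoms: indices 0..k-1 present
-- ===== SOURCE B (Python) =====
-- def _run_len_from_zero(idxs):
--     expected = 0
--     for v in sorted(set(idxs)):
--         if v == expected:
--             expected += 1
--         elif v > expected:
--             break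
--         # v < expected (a negative index): skip it
--     return expected
-- ===== Notes on version B (the rewrite author's own statement) =====
-- stated objective: alternative
-- what changed: Replaces the incremental set-membership probing loop (while k in s: k += 1) with a single ordered scan over sorted(set(idxs)) that advances an expected counter, skips negatives and breaks at the first gap.
import Mathlib
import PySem

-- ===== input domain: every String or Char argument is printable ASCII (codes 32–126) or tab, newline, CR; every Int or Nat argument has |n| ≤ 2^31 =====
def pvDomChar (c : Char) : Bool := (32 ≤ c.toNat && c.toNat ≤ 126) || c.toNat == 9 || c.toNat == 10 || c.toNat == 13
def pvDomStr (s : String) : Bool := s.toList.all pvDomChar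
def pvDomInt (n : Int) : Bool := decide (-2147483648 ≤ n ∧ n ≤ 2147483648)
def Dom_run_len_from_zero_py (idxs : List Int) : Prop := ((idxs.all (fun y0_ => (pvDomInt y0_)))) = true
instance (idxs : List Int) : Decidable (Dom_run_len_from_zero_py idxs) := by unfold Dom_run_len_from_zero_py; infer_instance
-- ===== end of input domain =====

-- B replaces A's incremental set-membership probing with a sort-then-single-ordered-scan (alternative decomposition, same result).


-- ===== PORT A =====
-- 'while k in s: k += 1', made total with a fuel bound (|s| + 1 distinct elements suffice, proved below); the loop body is unchanged.
def runLenWhile (fuel : Nat) (s : PySem.Set Int) (k : Int) : Int :=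
  match fuel with
  | 0 => k
  | fuel + 1 => if PySem.Set.contains s k then runLenWhile fuel s (k + 1) else k

def run_len_from_zero_py (idxs : List Int) : Int :=
  let s := PySem.Set.ofList idxs
  if ¬ PySem.Set.contains s 0 then 0
  else runLenWhile (s.length + 1) s 0

-- ===== PORT B =====
-- ordered scan over sorted(set(idxs)): advance on a match, skip values below expected, break at the first gap
def runLenScan (l : List Int) (expected : Int) : Int :=
  match l with
  | [] => expected
  | v :: t =>
      if v = expected then runLenScan t (expected + 1)
      else if v > expected then expected
      else runLenScan t expected

def run_len_from_zero_py_alt (idxs : List Int) : Int :=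
  runLenScan (PySem.List.sorted (PySem.Set.ofList idxs) (fun x => x) false) 0

-- ===== PRECONDITION & SPEC =====
def Spec_run_len_from_zero_py (idxs : List Int) (out : Int) : Prop := out = run_len_from_zero_py_alt idxs
instance (idxs : List Int) (out : Int) : Decidable (Spec_run_len_from_zero_py idxs out) := by unfold Spec_run_len_from_zero_py; infer_instance

-- ===== CLAIM (what is proved, stated in full; the proofs are below) =====
def Claim_equal_run_len_from_zero_py : Prop := ∀ (idxs : List Int), Dom_run_len_from_zero_py idxs → Spec_run_len_from_zero_py idxs (run_len_from_zero_py idxs)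

-- ===== LEMMAS AND PROOFS =====

-- A's while loop reaches N when [k, N) ⊆ s, N ∉ s, and fuel covers the distance.
theorem runLenWhile_eq (fuel : Nat) (s : PySem.Set Int) (N : Int) :
    ∀ k : Int, k ≤ N → (N - k).toNat ≤ fuel →
    (∀ j : Int, k ≤ j → j < N → j ∈ s) → N ∉ s →
    runLenWhile fuel s k = N := by
  induction fuel with
  | zero =>
      intro k hk hfuel _ _
      simp only [runLenWhile]
      omega
  | succ fuel ih =>
      intro k hk hfuel h1 h2
      simp only [runLenWhile]
      by_cases hc : k ∈ s
      · have hkN : k ≠ N := fun h => h2 (h ▸ hc)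
        have : PySem.Set.contains s k = true := by
          simpa [PySem.Set.contains] using hc
        simp only [this, if_true]
        exact ih (k + 1) (by omega) (by omega)
          (fun j hj hj' => h1 j (by omega) hj') h2
      · have hcf : PySem.Set.contains s k = false := by
          simpa [PySem.Set.contains] using hc
        rw [hcf]
        simp only [Bool.false_eq_true, if_false]
        by_contra hne
        exact hc (h1 k le_rfl (lt_of_le_of_ne hk hne))

-- B's scan on a strictly sorted list reaches N when [e, N) ⊆ l and N ∉ l.
theorem runLenScan_eq (l : List Int) :
    l.Pairwise (· < ·) →
    ∀ (e N : Int), e ≤ N →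
    (∀ j : Int, e ≤ j → j < N → j ∈ l) → N ∉ l →
    runLenScan l e = N := by
  induction l with
  | nil =>
      intro _ e N he h1 _
      simp only [runLenScan]
      by_contra hne
      exact absurd (h1 e le_rfl (lt_of_le_of_ne he hne)) (List.not_mem_nil)
  | cons v t ih =>
      intro hp e N he h1 h2
      have hvt : ∀ x ∈ t, v < x := (List.pairwise_cons.mp hp).1
      have hpt : t.Pairwise (· < ·) := (List.pairwise_cons.mp hp).2
      simp only [runLenScan]
      by_cases hv : v = e
      · subst hv
        have hvN : v ≠ N := fun h => h2 (h ▸ List.mem_cons_self)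
        simp only [if_true]
        refine ih hpt (v + 1) N (by omega) ?_ ?_
        · intro j hj hjN
          rcases List.mem_cons.mp (h1 j (by omega) hjN) with h | h
          · omega
          · exact h
        · intro hN
          exact h2 (List.mem_cons_of_mem _ hN)
      · rw [if_neg hv]
        by_cases hgt : v > e
        · rw [if_pos hgt]
          by_contra hne
          rcases List.mem_cons.mp (h1 e le_rfl (lt_of_le_of_ne he hne)) with h | h
          · omega
          · exact absurd (hvt e h) (by omega)
        · rw [if_neg hgt]
          refine ih hpt e N he ?_ (fun hN => h2 (List.mem_cons_of_mem _ hN))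
          intro j hj hjN
          rcases List.mem_cons.mp (h1 j hj hjN) with h | h
          · omega
          · exact h

-- some natural number 0..|s| is missing from s (pigeonhole on the duplicate-free s)
theorem exists_gap (s : List Int) :
    ∃ n : Nat, n ≤ s.length ∧ (n : Int) ∉ s := by
  by_contra h
  push Not at h
  have hsub : ((List.range (s.length + 1)).map (Int.ofNat)).Subset s := by
    intro x hx
    rcases List.mem_map.mp hx with ⟨n, hn', rfl⟩
    exact h n (Nat.lt_succ_iff.mp (List.mem_range.mp hn'))
  have hnd : ((List.range (s.length + 1)).map (Int.ofNat)).Nodup :=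
    (List.nodup_range).map (fun a b hab => Int.ofNat.inj hab)
  have := (List.subperm_of_subset hnd hsub).length_le
  simp at this

-- ===== VERDICT (by name: the statement is the Claim_ definition above) =====
theorem run_len_from_zero_py_spec : Claim_equal_run_len_from_zero_py := by
  intro idxs _
  unfold Spec_run_len_from_zero_py run_len_from_zero_py run_len_from_zero_py_alt
  set s := PySem.Set.ofList idxs with hs
  set l := PySem.List.sorted s (fun x => x) false with hl
  have hmem : ∀ x : Int, x ∈ l ↔ x ∈ s :=
    fun x => (PySem.List.sorted_perm s (fun x => x) false).mem_iff
  have hpl : l.Pairwise (· < ·) := PySem.List.sorted_ofList_pairwise_lt idxs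
  by_cases h0 : (0 : Int) ∈ s
  · have hc0 : PySem.Set.contains s 0 = true := by simpa [PySem.Set.contains] using h0
    rcases exists_gap s with ⟨w, hwL, hw⟩
    have hex : ∃ n : Nat, (n : Int) ∉ s := ⟨w, hw⟩
    set N := Nat.find hex with hN
    have hNs : (N : Int) ∉ s := Nat.find_spec hex
    have hNle : N ≤ s.length := le_trans (Nat.find_le hw) hwL
    have hmin : ∀ j : Int, 0 ≤ j → j < (N : Int) → j ∈ s := by
      intro j hj hjN
      have : (j.toNat : Int) = j := Int.toNat_of_nonneg hj
      rw [← this]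
      by_contra hc
      exact Nat.find_min hex (by omega) hc
    rw [if_neg (not_not_intro hc0)]
    have hA : runLenWhile (s.length + 1) s 0 = (N : Int) :=
      runLenWhile_eq _ s (N : Int) 0 (by positivity) (by omega) (fun j hj => hmin j hj) hNs
    have hB : runLenScan l 0 = (N : Int) :=
      runLenScan_eq l hpl 0 (N : Int) (by positivity)
        (fun j hj hjN => (hmem j).mpr (hmin j hj hjN)) (fun h => hNs ((hmem _).mp h))
    rw [hA, hB]
  · have hc0 : PySem.Set.contains s 0 = false := by simpa [PySem.Set.contains] using h0
    rw [if_pos (by simpa using h0)]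
    have hB : runLenScan l 0 = 0 :=
      runLenScan_eq l hpl 0 0 le_rfl (fun j hj hjN => absurd hjN (by omega))
        (fun h => h0 ((hmem _).mp h))
    rw [hB]
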